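-- pv_equiv track=rewrite | github.com/Tabolator1806/MaturaInfa | matura maj 2024/zad3.py | nieparzystySkrot
-- ===== SOURCE A (Python) =====
-- def nieparzystySkrot(n:int):
--     m = 0
--     p = 1
--     while n > 0:
--         cyfra = n % 10
--         if cyfra % 2 != 0:
--             m += cyfra * p
--             p *= 10
--         n //= 10
--     return m
-- ===== SOURCE B (Python) =====
-- def nieparzystySkrot(n: int):
--     # top-down recursion: no place-value accumulator; result built most-significant-first
--     if n <= 0:
--         return 0
--     r = nieparzystySkrot(n // 10)
--     d = n % 10
--     return r * 10 + d if d % 2 == 1 else r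
-- ===== Notes on version B (the rewrite author's own statement) =====
-- stated objective: simpler
-- what changed: Replaces the while loop that accumulates odd digits bottom-up with a place-value multiplier (m, p) by a short top-down recursion on the remaining higher digits that appends each odd digit most-significant-first, eliminating the multiplier state entirely.
import Mathlib
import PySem

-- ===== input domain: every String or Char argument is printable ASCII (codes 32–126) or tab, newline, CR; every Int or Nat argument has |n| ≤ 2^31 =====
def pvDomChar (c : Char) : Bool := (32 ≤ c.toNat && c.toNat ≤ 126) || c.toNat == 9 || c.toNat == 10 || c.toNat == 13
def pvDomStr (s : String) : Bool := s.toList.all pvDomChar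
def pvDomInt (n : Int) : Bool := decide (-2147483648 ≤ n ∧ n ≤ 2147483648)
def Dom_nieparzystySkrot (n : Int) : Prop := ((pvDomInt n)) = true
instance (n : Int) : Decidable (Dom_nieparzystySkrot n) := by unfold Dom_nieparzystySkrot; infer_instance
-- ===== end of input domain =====

-- B replaces A's bottom-up while loop with accumulator pair (m, p) by a top-down
-- structural recursion on the remaining higher digits, building the result most-significant-first (simpler).


-- ===== PORT A =====
-- the while loop of A, over the same state (n, m, p)
def nieparzystySkrotLoop (n m p : Int) : Int :=
  if h : n > 0 then
    let cyfra := PySem.Int.mod n 10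
    if PySem.Int.mod cyfra 2 ≠ 0 then
      nieparzystySkrotLoop (PySem.Int.floordiv n 10) (m + cyfra * p) (p * 10)
    else
      nieparzystySkrotLoop (PySem.Int.floordiv n 10) m p
  else m
termination_by n.toNat
decreasing_by
  all_goals
    rw [PySem.Int.floordiv_eq_ediv_of_pos (by norm_num : (0:Int) < 10)]
    omega

def nieparzystySkrot (n : Int) : Int := nieparzystySkrotLoop n 0 1

-- ===== PORT B =====
def nieparzystySkrot_alt (n : Int) : Int :=
  if n ≤ 0 then 0
  else
    let r := nieparzystySkrot_alt (PySem.Int.floordiv n 10)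
    let d := PySem.Int.mod n 10
    if PySem.Int.mod d 2 = 1 then r * 10 + d else r
termination_by n.toNat
decreasing_by
  rw [PySem.Int.floordiv_eq_ediv_of_pos (by norm_num : (0:Int) < 10)]
  omega

-- ===== PRECONDITION & SPEC =====
def Spec_nieparzystySkrot (n : Int) (out : Int) : Prop := out = nieparzystySkrot_alt n
instance (n : Int) (out : Int) : Decidable (Spec_nieparzystySkrot n out) := by unfold Spec_nieparzystySkrot; infer_instance

-- ===== CLAIM (what is proved, stated in full; the proofs are below) =====
def Claim_equal_nieparzystySkrot : Prop := ∀ (n : Int), Dom_nieparzystySkrot n → Spec_nieparzystySkrot n (nieparzystySkrot n)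

-- ===== LEMMAS AND PROOFS =====
-- loop invariant: the while loop computes m + (B's value of n) * p
theorem nieparzystySkrotLoop_eq (n m p : Int) :
    nieparzystySkrotLoop n m p = m + nieparzystySkrot_alt n * p := by
  induction n, m, p using nieparzystySkrotLoop.induct with
  | case1 n m p h cyfra hmod ih =>
    have hc : cyfra = n % 10 := PySem.Int.mod_eq_emod_of_pos (by norm_num)
    have hd : PySem.Int.mod n 10 = n % 10 := PySem.Int.mod_eq_emod_of_pos (by norm_num)
    have hfd : PySem.Int.floordiv n 10 = n / 10 := PySem.Int.floordiv_eq_ediv_of_pos (by norm_num)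
    have hm2 : PySem.Int.mod (n % 10) 2 = n % 10 % 2 := PySem.Int.mod_eq_emod_of_pos (by norm_num)
    have hodd : n % 10 % 2 = 1 := by
      have h2 := hmod
      rw [hc, hm2] at h2
      omega
    rw [hc, hfd] at ih
    rw [nieparzystySkrotLoop, nieparzystySkrot_alt]
    simp only [dif_pos h, if_neg (show ¬ n ≤ 0 by omega), hd, hm2, hfd]
    rw [if_pos (show n % 10 % 2 ≠ 0 by omega), if_pos hodd, ih]
    ring
  | case2 n m p h cyfra hmod ih =>
    have hc : cyfra = n % 10 := PySem.Int.mod_eq_emod_of_pos (by norm_num)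
    have hd : PySem.Int.mod n 10 = n % 10 := PySem.Int.mod_eq_emod_of_pos (by norm_num)
    have hfd : PySem.Int.floordiv n 10 = n / 10 := PySem.Int.floordiv_eq_ediv_of_pos (by norm_num)
    have hm2 : PySem.Int.mod (n % 10) 2 = n % 10 % 2 := PySem.Int.mod_eq_emod_of_pos (by norm_num)
    have heven : n % 10 % 2 = 0 := by
      have h2 := hmod
      rw [hc, hm2] at h2
      omega
    rw [hfd] at ih
    rw [nieparzystySkrotLoop, nieparzystySkrot_alt]
    simp only [dif_pos h, if_neg (show ¬ n ≤ 0 by omega), hd, hm2, hfd]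
    rw [if_neg (show ¬ n % 10 % 2 ≠ 0 by omega), if_neg (show ¬ n % 10 % 2 = 1 by omega), ih]
  | case3 n m p h =>
    rw [nieparzystySkrotLoop, nieparzystySkrot_alt]
    simp only [dif_neg h, if_pos (show n ≤ 0 by omega)]
    ring

-- ===== VERDICT (by name: the statement is the Claim_ definition above) =====
theorem nieparzystySkrot_spec : Claim_equal_nieparzystySkrot := by
  intro n _
  unfold Spec_nieparzystySkrot nieparzystySkrot
  rw [nieparzystySkrotLoop_eq]
  ring
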